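-- pv_equiv track=rewrite | github.com/macsko/concurrency-theory | lab05/main.py | is_dependent_on_list
-- ===== SOURCE A (Python) =====
-- def is_dependent_on_list(D, a, l, i):
--     if i >= len(l):
--         return False
--     else:
--         if (l[i], a) in D:
--             return True
--         else:
--             return is_dependent_on_list(D, a, l, i + 1)
-- ===== SOURCE B (Python) =====
-- def is_dependent_on_list(D, a, l, i):
--     return any((x, a) in D for x in l[i:])
-- ===== Notes on version B (the rewrite author's own statement) =====
-- stated objective: simpler
-- what changed: Replaced the index-carrying tail recursion by a single any(...) scan over the slice l[i:], eliminating indices and recursion entirely.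
-- intended difference: For negative in-range i (-len(l) <= i < 0) A's negative-index wraparound checks l[i] and then restarts from index 0, effectively scanning the whole list and returning True when any earlier pair matches, while B scans only the suffix l[i:], the intended meaning of 'from position i'. — e.g. on is_dependent_on_list([("x", "y")], "y", ["x", "z"], -1): A returns true, B returns false
import Mathlib
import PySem

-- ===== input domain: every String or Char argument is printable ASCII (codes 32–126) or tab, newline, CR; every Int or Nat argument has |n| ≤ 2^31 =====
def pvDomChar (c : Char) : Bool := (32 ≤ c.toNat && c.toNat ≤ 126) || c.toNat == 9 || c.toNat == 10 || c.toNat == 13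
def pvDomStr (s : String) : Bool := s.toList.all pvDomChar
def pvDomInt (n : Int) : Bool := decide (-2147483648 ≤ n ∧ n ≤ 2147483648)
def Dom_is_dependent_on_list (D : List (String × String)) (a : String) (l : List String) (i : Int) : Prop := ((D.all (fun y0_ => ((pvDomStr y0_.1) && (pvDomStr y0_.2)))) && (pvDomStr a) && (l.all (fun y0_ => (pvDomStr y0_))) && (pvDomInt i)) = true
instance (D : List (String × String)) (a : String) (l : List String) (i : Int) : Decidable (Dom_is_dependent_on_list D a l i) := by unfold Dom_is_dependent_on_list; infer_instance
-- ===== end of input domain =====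

-- B replaces A's index-carrying tail recursion by one any(...) scan over the slice l[i:]
-- (objective: simpler); for negative in-range i the two differ as stated in D_ below.

-- ===== PORT A =====
def is_dependent_on_list (D : List (String × String)) (a : String) (l : List String) (i : Int) : Bool :=
  if (l.length : Int) ≤ i then false
  else
    match PySem.List.pyGet? l i with
    | none => false  -- Python raises IndexError here; excluded by Pre_
    | some x => if (x, a) ∈ D then true else is_dependent_on_list D a l (i + 1)
termination_by ((l.length : Int) - i).toNat
decreasing_by omega

-- ===== PORT B =====
def is_dependent_on_list_alt (D : List (String × String)) (a : String) (l : List String) (i : Int) : Bool :=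
  (PySem.List.slice l (some i) none).any (fun x => decide ((x, a) ∈ D))

-- ===== PRECONDITION & SPEC =====
-- A raises IndexError exactly when i < -len(l) (its first access l[i] is out of range);
-- Pre_ excludes precisely those inputs. A returns on everything else.
def Pre_is_dependent_on_list (_D : List (String × String)) (_a : String) (l : List String) (i : Int) : Prop :=
  -(l.length : Int) ≤ i
instance (D : List (String × String)) (a : String) (l : List String) (i : Int) : Decidable (Pre_is_dependent_on_list D a l i) := by unfold Pre_is_dependent_on_list; infer_instance

def pvWitness_is_dependent_on_list : (List (String × String)) × String × List String × Int :=
  ([("x", "y")], "y", ["z", "x"], 0)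

-- For negative in-range i (-len(l) ≤ i < 0) A's negative-index wraparound checks l[i] and then
-- restarts from index 0, effectively scanning the whole list and returning True when any earlier
-- pair matches, while B scans only the suffix l[i:], the intended meaning of 'from position i'.
def D_is_dependent_on_list (D : List (String × String)) (a : String) (l : List String) (i : Int) : Prop :=
  i < 0 ∧ -(l.length : Int) ≤ i ∧
  (∃ p ∈ l.take ((l.length : Int) + i).toNat, (p, a) ∈ D) ∧
  (∀ q ∈ l.drop ((l.length : Int) + i).toNat, (q, a) ∉ D)
instance (D : List (String × String)) (a : String) (l : List String) (i : Int) : Decidable (D_is_dependent_on_list D a l i) := by unfold D_is_dependent_on_list; infer_instance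

def Spec_is_dependent_on_list (D : List (String × String)) (a : String) (l : List String) (i : Int) (out : Bool) : Prop := ¬ D_is_dependent_on_list D a l i → out = is_dependent_on_list_alt D a l i
instance (D : List (String × String)) (a : String) (l : List String) (i : Int) (out : Bool) : Decidable (Spec_is_dependent_on_list D a l i out) := by unfold Spec_is_dependent_on_list; infer_instance

def pvDiffWitness_is_dependent_on_list : (List (String × String)) × String × List String × Int :=
  ([("x", "y")], "y", ["x", "z"], -1)
def pvDiffWitnessOut_is_dependent_on_list : Bool × Bool := (true, false)

-- ===== CLAIM (what is proved, stated in full; the proofs are below) =====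
def Claim_unchanged_is_dependent_on_list : Prop := ∀ (D : List (String × String)) (a : String) (l : List String) (i : Int), Dom_is_dependent_on_list D a l i → Pre_is_dependent_on_list D a l i → Spec_is_dependent_on_list D a l i (is_dependent_on_list D a l i)
def Claim_changed_is_dependent_on_list : Prop := Dom_is_dependent_on_list (pvDiffWitness_is_dependent_on_list.1) (pvDiffWitness_is_dependent_on_list.2.1) (pvDiffWitness_is_dependent_on_list.2.2.1) (pvDiffWitness_is_dependent_on_list.2.2.2) ∧ Pre_is_dependent_on_list (pvDiffWitness_is_dependent_on_list.1) (pvDiffWitness_is_dependent_on_list.2.1) (pvDiffWitness_is_dependent_on_list.2.2.1) (pvDiffWitness_is_dependent_on_list.2.2.2) ∧ D_is_dependent_on_list (pvDiffWitness_is_dependent_on_list.1) (pvDiffWitness_is_dependent_on_list.2.1) (pvDiffWitness_is_dependent_on_list.2.2.1) (pvDiffWitness_is_dependent_on_list.2.2.2) ∧ is_dependent_on_list (pvDiffWitness_is_dependent_on_list.1) (pvDiffWitness_is_dependent_on_list.2.1) (pvDiffWitness_is_dependent_on_list.2.2.1) (pvDiffWitness_is_dependent_on_list.2.2.2) = pvDiffWitnessOut_is_dependent_on_list.1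 ∧ is_dependent_on_list_alt (pvDiffWitness_is_dependent_on_list.1) (pvDiffWitness_is_dependent_on_list.2.1) (pvDiffWitness_is_dependent_on_list.2.2.1) (pvDiffWitness_is_dependent_on_list.2.2.2) = pvDiffWitnessOut_is_dependent_on_list.2 ∧ pvDiffWitnessOut_is_dependent_on_list.1 ≠ pvDiffWitnessOut_is_dependent_on_list.2
def Claim_exact_is_dependent_on_list : Prop := ∀ (D : List (String × String)) (a : String) (l : List String) (i : Int), Dom_is_dependent_on_list D a l i → Pre_is_dependent_on_list D a l i → D_is_dependent_on_list D a l i → is_dependent_on_list D a l i ≠ is_dependent_on_list_alt D a l i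

-- ===== LEMMAS AND PROOFS =====
-- A on a nonnegative index j scans exactly the suffix l.drop j.
theorem A_nonneg (D : List (String × String)) (a : String) (l : List String) (j : Nat) :
    is_dependent_on_list D a l (j : Int) = (l.drop j).any (fun x => decide ((x, a) ∈ D)) := by
  by_cases h : l.length ≤ j
  · rw [is_dependent_on_list]
    rw [if_pos (show (l.length : Int) ≤ (j : Int) by exact_mod_cast h)]
    simp [List.drop_eq_nil_of_le h]
  · have hlt : j < l.length := by omega
    rw [is_dependent_on_list]
    rw [if_neg (show ¬ (l.length : Int) ≤ (j : Int) by exact_mod_cast h)]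
    have hget : PySem.List.pyGet? l (j : Int) = some l[j] := by
      rw [PySem.List.pyGet?_natCast]
      exact List.getElem?_eq_getElem hlt
    rw [hget]
    have hdrop : l.drop j = l[j] :: l.drop (j + 1) := (List.getElem_cons_drop hlt).symm
    rw [hdrop, List.any_cons]
    have ih := A_nonneg D a l (j + 1)
    by_cases hm : (l[j], a) ∈ D
    · simp [hm]
    · push_cast
      simp only [hm, if_false, decide_false, Bool.false_or]
      rw [show ((j : Int) + 1) = ((j + 1 : Nat) : Int) by push_cast; ring]
      exact ih
termination_by l.length - j
decreasing_by omega

-- A on a negative in-range index effectively scans the whole list.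
theorem A_neg (D : List (String × String)) (a : String) (l : List String) (i : Int)
    (hlo : -(l.length : Int) ≤ i) (hneg : i < 0) :
    is_dependent_on_list D a l i = l.any (fun x => decide ((x, a) ∈ D)) := by
  have hn : 0 < l.length := by omega
  have hle : ¬ (l.length : Int) ≤ i := by omega
  rw [is_dependent_on_list, if_neg hle]
  cases hget : PySem.List.pyGet? l i with
  | none =>
    have hinr : PySem.Raise.InRange l.length i := by
      simp [PySem.Raise.InRange]; omega
    exact absurd hinr ((PySem.List.pyGet?_eq_none_iff l i).mp hget)
  | some x =>
    have hmem : x ∈ l := PySem.List.mem_of_pyGet?_eq_some l hget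
    by_cases hm : (x, a) ∈ D
    · have hany : l.any (fun y => decide ((y, a) ∈ D)) = true :=
        List.any_eq_true.2 ⟨x, hmem, by simp [hm]⟩
      simp [hm, hany]
    · have htail : is_dependent_on_list D a l (i + 1) = l.any (fun y => decide ((y, a) ∈ D)) := by
        by_cases h0 : i + 1 < 0
        · exact A_neg D a l (i + 1) (by omega) h0
        · have h1 : i + 1 = ((0 : Nat) : Int) := by omega
          rw [h1, A_nonneg]
          simp
      simp [hm, htail]
termination_by (-i).toNat
decreasing_by omega

-- B on a negative in-range index scans the suffix l.drop (len + i).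
theorem B_eq_drop (D : List (String × String)) (a : String) (l : List String) (i : Int)
    (hlo : -(l.length : Int) ≤ i) (hneg : i < 0) :
    is_dependent_on_list_alt D a l i =
      (l.drop ((l.length : Int) + i).toNat).any (fun x => decide ((x, a) ∈ D)) := by
  rw [is_dependent_on_list_alt, PySem.List.slice_some_none]
  congr 2
  simp only [PySem.List.clampIdx]
  split_ifs <;> omega

theorem is_dependent_on_list_spec : Claim_unchanged_is_dependent_on_list := by
  intro D a l i _ hpre hnd
  unfold Pre_is_dependent_on_list at hpre
  by_cases h0 : 0 ≤ i
  · obtain ⟨j, rfl⟩ := Int.eq_ofNat_of_zero_le h0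
    rw [A_nonneg, is_dependent_on_list_alt, PySem.List.slice_from _ h0]
    simp
  · have hneg : i < 0 := by omega
    rw [A_neg D a l i hpre hneg, B_eq_drop D a l i hpre hneg]
    set k := ((l.length : Int) + i).toNat with hk
    have hsplit : l = l.take k ++ l.drop k := (List.take_append_drop k l).symm
    unfold D_is_dependent_on_list at hnd
    push_neg at hnd
    by_cases hpre' : ∃ p ∈ l.take k, (p, a) ∈ D
    · obtain ⟨q, hq, hqD⟩ := hnd hneg hpre hpre'
      have h1 : (l.drop k).any (fun x => decide ((x, a) ∈ D)) = true :=
        List.any_eq_true.2 ⟨q, hq, by simp [hqD]⟩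
      have h2 : l.any (fun x => decide ((x, a) ∈ D)) = true :=
        List.any_eq_true.2 ⟨q, by rw [hsplit]; exact List.mem_append_right _ hq, by simp [hqD]⟩
      rw [h1, h2]
    · conv_lhs => rw [hsplit]
      rw [List.any_append]
      have hfalse : (l.take k).any (fun x => decide ((x, a) ∈ D)) = false := by
        rw [List.any_eq_false]
        intro p hp
        simp only [decide_eq_true_eq]
        exact fun hm => hpre' ⟨p, hp, hm⟩
      simp [hfalse]

theorem is_dependent_on_list_changed : Claim_changed_is_dependent_on_list := by
  unfold Claim_changed_is_dependent_on_list
  refine ⟨by decide, by decide, by decide, ?_, by decide, by decide⟩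
  show is_dependent_on_list [("x", "y")] "y" ["x", "z"] (-1) = true
  rw [A_neg [("x", "y")] "y" ["x", "z"] (-1) (by norm_num) (by norm_num)]
  decide

theorem is_dependent_on_list_tight : Claim_exact_is_dependent_on_list := by
  intro D a l i _ hpre hd
  obtain ⟨hneg, hlo, ⟨p, hp, hpD⟩, hsuf⟩ := hd
  rw [A_neg D a l i hlo hneg, B_eq_drop D a l i hlo hneg]
  have hA : l.any (fun x => decide ((x, a) ∈ D)) = true :=
    List.any_eq_true.2 ⟨p, List.mem_of_mem_take hp, by simp [hpD]⟩
  have hB : (l.drop ((l.length : Int) + i).toNat).any (fun x => decide ((x, a) ∈ D)) = false := by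
    rw [List.any_eq_false]
    intro q hq
    simp only [decide_eq_true_eq]
    exact hsuf q hq
  rw [hA, hB]
  simp
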